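-- pv_equiv track=rewrite | github.com/manas-17045/LeetcodeSolutions | Leetcode 3801-3900/3801/3801.py | minMergeCost
-- ===== SOURCE A (Python) =====
-- def minMergeCost(lists: list[list[int]]) -> int:
--     """
--     Calculates the minimum cost to merge a given set of sorted lists.
--
--     Args:
--         lists: A list of sorted lists of integers.
--     Returns:
--         The minimum cost to merge all the lists into a single sorted list.
--     """
--     n = len(lists)
--     limit = 1 << n
--     dp = [float('inf')] * limit
--     medians = [0] * limit
--
--     for mask in range(1, limit):
--         currentElements = []
--         for i in range(n):
--             if (mask >> i) & 1:
--                 currentElements.extend(lists[i])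
--
--         currentElements.sort()
--         currentLength = len(currentElements)
--         medians[mask] = currentElements[(currentLength - 1) // 2]
--
--         if (mask & (mask - 1)) == 0:
--             dp[mask] = 0
--             continue
--
--         lowestBit = mask & -mask
--         subsetMask = mask ^ lowestBit
--         sub = subsetMask
--         minCost = float('inf')
--
--         while True:
--             part1 = sub | lowestBit
--             part2 = mask ^ part1
--
--             if part2 > 0:
--                 currentMergeCost = dp[part1] + dp[part2] + abs(medians[part1] - medians[part2])
--                 if currentMergeCost < minCost:
--                     minCost = currentMergeCost
--
--             if sub == 0:
--                 break
--             sub = (sub - 1) & subsetMask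
--
--         dp[mask] = minCost + currentLength
--
--     return dp[limit - 1]
-- ===== SOURCE B (Python) =====
-- def _merge(a, b):
--     """Two-pointer merge of two sorted lists."""
--     out = []
--     i = j = 0
--     while i < len(a) and j < len(b):
--         if a[i] <= b[j]:
--             out.append(a[i])
--             i += 1
--         else:
--             out.append(b[j])
--             j += 1
--     out.extend(a[i:])
--     out.extend(b[j:])
--     return out
--
--
-- def minMergeCost(lists: list[list[int]]) -> int:
--     n = len(lists)
--     limit = 1 << n
--     sortedLists = [sorted(l) for l in lists]   # each list sorted once
--     merged = [[] for _ in range(limit)]        # merged[mask]: sorted multiset of the selected lists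
--     medians = [0] * limit
--     dp = [0] * limit
--     for mask in range(1, limit):
--         low = mask & -mask
--         rest = mask ^ low
--         merged[mask] = _merge(sortedLists[low.bit_length() - 1], merged[rest])
--         medians[mask] = merged[mask][(len(merged[mask]) - 1) // 2]
--         if rest == 0:
--             continue
--         best = None
--         sub = (rest - 1) & rest   # proper submasks of rest, descending (skips the p2 == 0 split)
--         while True:
--             p1 = sub | low
--             p2 = mask ^ p1
--             c = dp[p1] + dp[p2] + abs(medians[p1] - medians[p2])
--             if best is None or c < best:
--                 best = c
--             if sub == 0:
--                 break
--             sub = (sub - 1) & rest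
--         dp[mask] = best + len(merged[mask])
--     return dp[limit - 1]
-- ===== Notes on version B (the rewrite author's own statement) =====
-- stated objective: alternative
-- what changed: Instead of rebuilding and fully re-sorting the selected elements for every mask, B sorts each input list once and builds each mask's sorted multiset by a two-pointer merge of the lowest bit's (pre-sorted) list with the already-built rest-mask; the dp uses plain ints (no float inf sentinel) and enumerates only the proper submask splits directly instead of guarding out the empty part; per-mask work drops from O(L log L) to O(L), though CPython's C-level sort means no measured wall-clock win.
-- outside the precondition, e.g. on minMergeCost([]): A returns inf, B returns 0
import Mathlib
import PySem

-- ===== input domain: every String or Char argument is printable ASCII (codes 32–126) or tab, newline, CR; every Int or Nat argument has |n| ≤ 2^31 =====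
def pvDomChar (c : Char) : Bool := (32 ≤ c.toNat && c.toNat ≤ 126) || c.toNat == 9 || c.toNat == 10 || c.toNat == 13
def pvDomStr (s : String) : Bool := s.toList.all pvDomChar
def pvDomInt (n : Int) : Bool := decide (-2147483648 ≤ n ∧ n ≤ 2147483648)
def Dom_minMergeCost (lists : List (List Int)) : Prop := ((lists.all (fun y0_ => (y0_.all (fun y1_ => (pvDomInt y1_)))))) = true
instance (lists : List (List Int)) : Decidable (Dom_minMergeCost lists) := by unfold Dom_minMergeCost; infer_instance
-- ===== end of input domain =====

-- B replaces A's per-mask rebuild-and-sort of the selected elements by a one-time sort of each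
-- input list plus an incremental two-pointer merge per mask, uses a plain-Int dp (no float-inf
-- sentinel) and enumerates only the proper submask splits.  Objective: alternative algorithm.

-- ===== PORT A =====

/-- `float('inf')` modelled as `none`: addition absorbs it (inf + x = inf). -/
def pvOAdd (a b : Option Int) : Option Int :=
  match a, b with
  | some x, some y => some (x + y)
  | _, _ => none

/-- Python `<` with `none` = `float('inf')`: `inf < _` is False, `x < inf` is True. -/
def pvOLt (a b : Option Int) : Bool :=
  match a, b with
  | some x, some y => decide (x < y)
  | some _, none => true
  | none, _ => false

/-- A's `currentElements`: `for i in range(n): if (mask >> i) & 1: currentElements.extend(lists[i])`. -/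
def pvASelect (lists : List (List Int)) (n mask : Nat) : List Int :=
  (List.range n).foldl (fun acc i => if (mask >>> i) &&& 1 == 1 then acc ++ lists.getD i [] else acc) []

/-- A's inner `while True` over submasks `sub` of `subsetMask` (descending via `(sub-1) & subsetMask`). -/
def pvALoop (dp : Array (Option Int)) (med : Array Int) (mask low subsetMask : Nat)
    (sub : Nat) (minCost : Option Int) : Option Int :=
  let part1 := sub ||| low
  let part2 := mask ^^^ part1
  let minCost' :=
    if part2 > 0 then
      let c := pvOAdd (pvOAdd (dp.getD part1 none) (dp.getD part2 none))
                      (some |med.getD part1 0 - med.getD part2 0|)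
      if pvOLt c minCost then c else minCost
    else minCost
  if sub = 0 then minCost'
  else pvALoop dp med mask low subsetMask ((sub - 1) &&& subsetMask) minCost'
termination_by sub
decreasing_by
  have h := Nat.and_le_left (n := sub - 1) (m := subsetMask)
  omega

/-- One iteration of A's `for mask in range(1, limit)` loop; state is `(dp, medians)`. -/
def pvAStep (lists : List (List Int)) (n : Nat)
    (st : Array (Option Int) × Array Int) (mask : Nat) : Array (Option Int) × Array Int :=
  let dp := st.1
  let med := st.2
  let elems := PySem.List.sorted (pvASelect lists n mask) (fun x => x) false
  let currentLength := elems.length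
  -- `currentElements[(currentLength - 1) // 2]`; the `.getD 0` is reached only off `Pre_` (empty selection → IndexError)
  let m := (PySem.List.pyGet? elems (PySem.Int.floordiv ((currentLength : Int) - 1) 2)).getD 0
  let med := med.setIfInBounds mask m
  if mask &&& (mask - 1) == 0 then
    (dp.setIfInBounds mask (some 0), med)
  else
    -- `mask & -mask` (two's complement lowest set bit), written for Nat as `mask - (mask & (mask-1))`
    let low := mask - (mask &&& (mask - 1))
    let subsetMask := mask ^^^ low
    let minCost := pvALoop dp med mask low subsetMask subsetMask none
    (dp.setIfInBounds mask (pvOAdd minCost (some (currentLength : Int))), med)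

def minMergeCost (lists : List (List Int)) : Int :=
  let n := lists.length
  let limit := 2 ^ n      -- 1 << n
  let dp0 : Array (Option Int) := Array.replicate limit none   -- [float('inf')] * limit
  let med0 : Array Int := Array.replicate limit 0
  let st := (List.range' 1 (limit - 1)).foldl (pvAStep lists n) (dp0, med0)
  -- `dp[limit-1]`; `.getD 0` is reached only off `Pre_` (there Python returns the float inf)
  (st.1.getD (limit - 1) none).getD 0

-- ===== PORT B =====

/-- `_merge`: the two-pointer merge loop, as structural recursion consuming the smaller head
    (same comparisons, same output order; exhausted side appended). -/
def pvMerge (a b : List Int) : List Int :=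
  match a, b with
  | [], b => b
  | a, [] => a
  | x :: xs, y :: ys => if x ≤ y then x :: pvMerge xs (y :: ys) else y :: pvMerge (x :: xs) ys

/-- B's inner `while True` over proper submasks of `rest`; `best : Option Int` is Python's `None`/int. -/
def pvBLoop (dp med : Array Int) (mask low rest : Nat) (sub : Nat) (best : Option Int) : Option Int :=
  let p1 := sub ||| low
  let p2 := mask ^^^ p1
  let c := dp.getD p1 0 + dp.getD p2 0 + |med.getD p1 0 - med.getD p2 0|
  let best' :=
    match best with
    | none => some c
    | some b => if c < b then some c else some b
  if sub = 0 then best'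
  else pvBLoop dp med mask low rest ((sub - 1) &&& rest) best'
termination_by sub
decreasing_by
  have h := Nat.and_le_left (n := sub - 1) (m := rest)
  omega

/-- One iteration of B's mask loop; state is `(dp, medians, merged)`. -/
def pvBStep (sortedLists : List (List Int))
    (st : Array Int × Array Int × Array (List Int)) (mask : Nat) :
    Array Int × Array Int × Array (List Int) :=
  let dp := st.1
  let med := st.2.1
  let merged := st.2.2
  let low := mask - (mask &&& (mask - 1))     -- mask & -mask
  let rest := mask ^^^ low
  -- `sortedLists[low.bit_length() - 1]`
  let mg := pvMerge (sortedLists.getD (PySem.Int.bitLength (low : Int) - 1) [])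
                    (merged.getD rest [])
  let merged := merged.setIfInBounds mask mg
  -- `merged[mask][(len - 1) // 2]`; `.getD 0` is reached only off `Pre_`
  let med := med.setIfInBounds mask
      ((PySem.List.pyGet? mg (PySem.Int.floordiv ((mg.length : Int) - 1) 2)).getD 0)
  if rest = 0 then (dp, med, merged)
  else
    let best := pvBLoop dp med mask low rest ((rest - 1) &&& rest) none
    -- `best` is always an int here (the do-while body runs at least once); `.getD 0` is never the value used
    (dp.setIfInBounds mask (best.getD 0 + (mg.length : Int)), med, merged)

def minMergeCost_alt (lists : List (List Int)) : Int :=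
  let n := lists.length
  let limit := 2 ^ n
  let sortedLists := lists.map (fun l => PySem.List.sorted l (fun x => x) false)
  let st0 : Array Int × Array Int × Array (List Int) :=
    (Array.replicate limit 0, Array.replicate limit 0, Array.replicate limit [])
  let st := (List.range' 1 (limit - 1)).foldl (pvBStep sortedLists) st0
  st.1.getD (limit - 1) 0

-- ===== PRECONDITION & SPEC =====
-- Pre_ excludes the empty outer list (A returns float('inf'), not an int) and any empty inner
-- list (A raises IndexError taking the median of an empty selection).
def Pre_minMergeCost (lists : List (List Int)) : Prop :=
  lists ≠ [] ∧ ∀ l ∈ lists, l ≠ []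
instance (lists : List (List Int)) : Decidable (Pre_minMergeCost lists) := by
  unfold Pre_minMergeCost; infer_instance

def pvWitness_minMergeCost : List (List Int) := [[3, 1], [2], [5, 4]]

def Spec_minMergeCost (lists : List (List Int)) (out : Int) : Prop := out = minMergeCost_alt lists
instance (lists : List (List Int)) (out : Int) : Decidable (Spec_minMergeCost lists out) := by
  unfold Spec_minMergeCost; infer_instance

-- ===== CLAIM (what is proved, stated in full; the proofs are below) =====
def Claim_equal_minMergeCost : Prop :=
  ∀ (lists : List (List Int)), Dom_minMergeCost lists → Pre_minMergeCost lists →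
    Spec_minMergeCost lists (minMergeCost lists)

-- ===== LEMMAS AND PROOFS =====

/-- `sorted(select)` of a mask — what A sorts and what B maintains incrementally in `merged`. -/
def pvS (lists : List (List Int)) (n m : Nat) : List Int :=
  PySem.List.sorted (pvASelect lists n m) (fun x => x) false

-- ---- array getD/set toolkit ----
theorem pv_getD_set_self {α : Type} (a : Array α) (i : Nat) (h : i < a.size) (v d : α) :
    (a.setIfInBounds i v).getD i d = v := by
  simp [Array.getD_eq_getD_getElem?, h]

theorem pv_getD_set_ne {α : Type} (a : Array α) {i j : Nat} (h : i ≠ j) (v : α) (d : α) :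
    (a.setIfInBounds i v).getD j d = a.getD j d := by
  simp [Array.getD_eq_getD_getElem?, h]

theorem pv_getD_replicate {α : Type} (n i : Nat) (a d : α) (h : a = d) :
    (Array.replicate n a).getD i d = d := by
  subst h; by_cases hi : i < n <;> simp [Array.getD_eq_getD_getElem?, hi]

-- ---- bit toolkit ----
theorem pv_tb_mask (i q j : Nat) : (2^(i+1)*q + 2^i).testBit j =
    (if j < i then false else if j = i then true else q.testBit (j-i-1)) := by
  have h1 : 2^(i+1)*q + 2^i = (2*q+1) * 2^i := by ring
  rw [h1, Nat.testBit_mul_two_pow]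
  rcases lt_trichotomy j i with h | h | h
  · simp [h, Nat.not_le.mpr h]
  · subst h; simp
  · have hij : i ≤ j := le_of_lt h
    have h2 : j - i = (j - i - 1) + 1 := by omega
    simp only [hij, decide_true, Bool.true_and, if_neg (by omega : ¬ j < i), if_neg (by omega : ¬ j = i)]
    rw [h2, Nat.testBit_succ]
    have : (2 * q + 1) / 2 = q := by omega
    rw [this]
    congr 1

theorem pv_tb_rest (i q j : Nat) : (2^(i+1)*q).testBit j =
    (if j ≤ i then false else q.testBit (j-i-1)) := by
  have h1 : 2^(i+1)*q = q * 2^(i+1) := by ring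
  rw [h1, Nat.testBit_mul_two_pow]
  by_cases h : j ≤ i
  · simp [h, show ¬ (i + 1 ≤ j) by omega]
  · have hij : i + 1 ≤ j := by omega
    simp only [hij, decide_true, Bool.true_and, if_neg h]
    congr 1

/-- lowest-set-bit decomposition: `mask & (mask-1)` clears the lowest bit. -/
theorem pvMaskDecomp (mask : Nat) (h : mask ≠ 0) :
    ∃ i q, mask = 2^(i+1)*q + 2^i ∧ mask &&& (mask - 1) = 2^(i+1)*q := by
  induction mask using Nat.strong_induction_on with
  | _ mask ih =>
    rcases Nat.even_or_odd mask with he | ho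
    · obtain ⟨k, hk⟩ := he
      have hk2 : mask = 2 * k := by omega
      have hkne : k ≠ 0 := by omega
      obtain ⟨i, q, hrep, hand⟩ := ih k (by omega) hkne
      refine ⟨i+1, q, by rw [hk2, hrep]; ring, ?_⟩
      have hstep : mask &&& (mask - 1) = 2 * (k &&& (k - 1)) := by
        apply Nat.eq_of_testBit_eq
        intro j
        cases j with
        | zero =>
          simp [Nat.testBit_and, Nat.testBit_zero]
          omega
        | succ j =>
          rw [Nat.testBit_and, Nat.testBit_succ, Nat.testBit_succ, Nat.testBit_succ,
            ← Nat.testBit_and]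
          have e1 : mask / 2 = k := by omega
          have e2 : (mask - 1) / 2 = k - 1 := by omega
          have e3 : 2 * (k &&& (k-1)) / 2 = k &&& (k-1) := by omega
          rw [e1, e2, e3]
      rw [hstep, hand]; ring
    · obtain ⟨k, hk⟩ := ho
      refine ⟨0, k, by omega, ?_⟩
      have : mask &&& (mask - 1) = 2 * k := by
        apply Nat.eq_of_testBit_eq
        intro j
        cases j with
        | zero =>
          simp [Nat.testBit_and, Nat.testBit_zero]
          omega
        | succ j =>
          rw [Nat.testBit_and, Nat.testBit_succ, Nat.testBit_succ, Nat.testBit_succ]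
          have e1 : mask / 2 = k := by omega
          have e2 : (mask - 1) / 2 = k := by omega
          have e3 : 2 * k / 2 = k := by omega
          rw [e1, e2, e3, Bool.and_self]
      rw [this]; ring

-- ---- selection ----
theorem pv_guard (m j : Nat) : ((m >>> j) &&& 1 == 1) = m.testBit j := by
  have : Nat.testBit m j = ((m >>> j) % 2 == 1) := by
    simp [Nat.testBit, Nat.one_and_eq_mod_two]
  rw [this, Nat.and_one_is_mod]

theorem pv_select_flat (lists : List (List Int)) (n mask : Nat) :
    pvASelect lists n mask
      = (List.range n).flatMap (fun j => if mask.testBit j then lists.getD j [] else []) := by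
  unfold pvASelect
  have gen : ∀ (l : List Nat) (acc : List Int),
      l.foldl (fun acc i => if (mask >>> i) &&& 1 == 1 then acc ++ lists.getD i [] else acc) acc
        = acc ++ l.flatMap (fun j => if mask.testBit j then lists.getD j [] else []) := by
    intro l
    induction l with
    | nil => simp
    | cons x xs ih =>
      intro acc
      rw [List.foldl_cons, List.flatMap_cons, ih, pv_guard]
      by_cases hx : mask.testBit x <;> simp [hx]
  rw [gen]
  simp

theorem pv_select_zero (lists : List (List Int)) (n : Nat) : pvASelect lists n 0 = [] := by
  rw [pv_select_flat]
  simp [Nat.zero_testBit]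

theorem pv_select_split (lists : List (List Int)) (n i q : Nat) (hin : i < n) :
    pvASelect lists n (2^(i+1)*q + 2^i)
      = lists.getD i [] ++ pvASelect lists n (2^(i+1)*q) := by
  rw [pv_select_flat, pv_select_flat]
  have hn : n = (i+1) + (n - (i+1)) := by omega
  rw [hn, List.range_add, List.flatMap_append, List.flatMap_append, List.range_succ,
    List.flatMap_append, List.flatMap_append]
  have h1 : (List.range i).flatMap
      (fun j => if (2^(i+1)*q + 2^i).testBit j then lists.getD j [] else []) = [] := by
    apply List.flatMap_eq_nil_iff.mpr
    intro j hj
    rw [List.mem_range] at hj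
    simp [pv_tb_mask, hj]
  have h1' : (List.range i).flatMap
      (fun j => if (2^(i+1)*q).testBit j then lists.getD j [] else []) = [] := by
    apply List.flatMap_eq_nil_iff.mpr
    intro j hj
    rw [List.mem_range] at hj
    simp [pv_tb_rest, (by omega : j ≤ i)]
  have h2 : ([i] : List Nat).flatMap
      (fun j => if (2^(i+1)*q + 2^i).testBit j then lists.getD j [] else []) = lists.getD i [] := by
    simp [pv_tb_mask]
  have h2' : ([i] : List Nat).flatMap
      (fun j => if (2^(i+1)*q).testBit j then lists.getD j [] else []) = [] := by
    simp [pv_tb_rest]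
  have h3 : ((List.range (n - (i+1))).map (i+1+·)).flatMap
        (fun j => if (2^(i+1)*q + 2^i).testBit j then lists.getD j [] else [])
      = ((List.range (n - (i+1))).map (i+1+·)).flatMap
        (fun j => if (2^(i+1)*q).testBit j then lists.getD j [] else []) := by
    apply List.flatMap_congr  -- may not exist; fallback below
    intro j hj
    obtain ⟨x, hx, rfl⟩ := List.mem_map.mp hj
    rw [pv_tb_mask, pv_tb_rest]
    simp [show ¬ (i+1+x < i) by omega, show ¬ (i+1+x = i) by omega, show ¬ (i+1+x ≤ i) by omega]
  rw [h1, h1', h2, h2', h3]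
  simp

-- ---- merge ----
theorem pvMerge_perm (a b : List Int) : (pvMerge a b).Perm (a ++ b) := by
  fun_induction pvMerge with
  | case1 b => simp
  | case2 a h => simp
  | case3 x xs y ys hle ih =>
    simpa [pvMerge, hle] using ih.cons x
  | case4 x xs y ys hle ih =>
    exact (ih.cons y).trans List.perm_middle.symm

theorem pvMerge_pairwise (a b : List Int) (ha : a.Pairwise (· ≤ ·)) (hb : b.Pairwise (· ≤ ·)) :
    (pvMerge a b).Pairwise (· ≤ ·) := by
  revert ha hb
  fun_induction pvMerge with
  | case1 b => exact fun _ hb => hb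
  | case2 a h => exact fun ha _ => ha
  | case3 x xs y ys hle ih =>
    intro ha hb
    rw [List.pairwise_cons] at ha
    refine List.pairwise_cons.mpr ⟨?_, ih ha.2 hb⟩
    intro z hz
    have hz' : z ∈ xs ++ y :: ys := (pvMerge_perm xs (y :: ys)).mem_iff.mp hz
    rcases List.mem_append.mp hz' with h | h
    · exact ha.1 z h
    · rcases List.mem_cons.mp h with rfl | h
      · exact hle
      · exact hle.trans ((List.pairwise_cons.mp hb).1 z h)
  | case4 x xs y ys hle ih =>
    intro ha hb
    rw [List.pairwise_cons] at hb
    have hyx : y ≤ x := le_of_not_ge hle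
    refine List.pairwise_cons.mpr ⟨?_, ih ha hb.2⟩
    intro z hz
    have hz' : z ∈ (x :: xs) ++ ys := (pvMerge_perm (x :: xs) ys).mem_iff.mp hz
    rcases List.mem_append.mp hz' with h | h
    · rcases List.mem_cons.mp h with rfl | h
      · exact hyx
      · exact hyx.trans ((List.pairwise_cons.mp ha).1 z h)
    · exact hb.1 z h

/-- B's incremental merge reproduces A's sort of the selected elements. -/
theorem pv_merge_S (lists : List (List Int)) (i q : Nat) (hin : i < lists.length) :
    pvMerge (PySem.List.sorted (lists.getD i []) (fun x => x) false)
        (pvS lists lists.length (2^(i+1)*q))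
      = pvS lists lists.length (2^(i+1)*q + 2^i) := by
  symm
  apply PySem.List.sorted_id_eq_of_perm_of_pairwise
  · refine (pvMerge_perm _ _).trans ?_
    rw [pv_select_split lists lists.length i q hin]
    exact (PySem.List.sorted_perm _ _ _).append (PySem.List.sorted_perm _ _ _)
  · exact pvMerge_pairwise _ _ (PySem.List.sorted_pairwise _ _) (PySem.List.sorted_pairwise _ _)

theorem pv_bitLength_two_pow (i : Nat) : PySem.Int.bitLength ((2^i : Nat) : Int) = i + 1 := by
  induction i with
  | zero => decide
  | succ i ih =>
    have hpos : (0:Int) < ((2^(i+1) : Nat) : Int) := by positivity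
    rw [PySem.Int.bitLength_of_pos hpos]
    have hfd : PySem.Int.floordiv ((2^(i+1) : Nat) : Int) 2 = ((2^i : Nat) : Int) := by
      have := PySem.Int.floordiv_natCast (2^(i+1)) 2
      rw [show ((2:Nat):Int) = (2:Int) by norm_num] at this
      rw [this]
      norm_num [pow_succ]
    rw [hfd, ih]

-- ---- the inner min loops agree ----
theorem pvBLoop_some (dp med : Array Int) (mask low rest : Nat) :
    ∀ sub best, ∃ v, pvBLoop dp med mask low rest sub best = some v := by
  intro sub
  induction sub using Nat.strong_induction_on with
  | _ sub ih =>
    intro best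
    rw [pvBLoop.eq_def]
    by_cases h0 : sub = 0
    · cases best <;> simp [h0] <;> split <;> simp
    · have hlt : (sub - 1) &&& rest < sub := by
        have := Nat.and_le_left (n := sub - 1) (m := rest)
        omega
      cases best <;> simp only [h0, if_neg h0, reduceIte] <;> [skip; split] <;> exact ih _ hlt _

theorem pv_loop_eq (dpA : Array (Option Int)) (medA : Array Int) (dpB medB : Array Int)
    (i q : Nat) (mask : Nat) (hm : mask = 2^(i+1)*q + 2^i)
    (Hdp : ∀ m, 1 ≤ m → m < mask → dpA.getD m none = some (dpB.getD m 0))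
    (Hmed : ∀ m, 1 ≤ m → m < mask → medA.getD m 0 = medB.getD m 0) :
    ∀ sub, sub &&& (2^(i+1)*q) = sub → sub ≠ 2^(i+1)*q → ∀ best,
      pvALoop dpA medA mask (2^i) (2^(i+1)*q) sub best
        = pvBLoop dpB medB mask (2^i) (2^(i+1)*q) sub best := by
  intro sub
  induction sub using Nat.strong_induction_on with
  | _ sub ih =>
    intro hsub hne best
    have hsubbit : ∀ j, sub.testBit j = true → (2^(i+1)*q).testBit j = true := by
      intro j hj
      have h := congrArg (fun x => x.testBit j) hsub
      simp only [Nat.testBit_and, hj, Bool.true_and] at h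
      exact h
    have hsuble : sub ≤ 2^(i+1)*q := by
      conv_lhs => rw [← hsub]
      exact Nat.and_le_right
    have hp1i : (sub ||| 2^i).testBit i = true := by
      simp [Nat.testBit_or, Nat.testBit_two_pow]
    have hp1pos : 0 < sub ||| 2^i := by
      rcases Nat.eq_zero_or_pos (sub ||| 2^i) with h | h
      · rw [h, Nat.zero_testBit] at hp1i; exact absurd hp1i (by simp)
      · exact h
    have hp1sub : ∀ j, (sub ||| 2^i).testBit j = true → mask.testBit j = true := by
      intro j hj
      rw [Nat.testBit_or, Bool.or_eq_true] at hj
      rw [hm, pv_tb_mask]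
      rcases hj with hj | hj
      · have hr := hsubbit j hj
        rw [pv_tb_rest] at hr
        by_cases hji : j ≤ i
        · rw [if_pos hji] at hr; exact absurd hr (by simp)
        · rw [if_neg hji] at hr
          rw [if_neg (by omega : ¬ j < i), if_neg (by omega : ¬ j = i)]
          exact hr
      · rw [Nat.testBit_two_pow] at hj
        have : i = j := by simpa using hj
        subst this
        simp
    have hp1le : sub ||| 2^i ≤ mask := Nat.le_of_testBit hp1sub
    have hp1ne : sub ||| 2^i ≠ mask := by
      intro heq
      apply hne
      apply Nat.eq_of_testBit_eq
      intro j
      by_cases hji : j ≤ i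
      · have hrj : (2^(i+1)*q).testBit j = false := by rw [pv_tb_rest, if_pos hji]
        rw [hrj]
        by_cases hsj : sub.testBit j = true
        · have h2 := hsubbit j hsj; rw [hrj] at h2; exact absurd h2 (by simp)
        · simpa using hsj
      · have h := congrArg (fun x => x.testBit j) heq
        simp only [Nat.testBit_or, Nat.testBit_two_pow] at h
        rw [hm, pv_tb_mask, if_neg (by omega : ¬ j < i), if_neg (by omega : ¬ j = i)] at h
        simp only [show (i = j) = False by simp; omega, decide_false, Bool.or_false] at h
        rw [h, pv_tb_rest, if_neg hji]
    have hp1lt : sub ||| 2^i < mask := lt_of_le_of_ne hp1le hp1ne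
    have hp2ne0 : mask ^^^ (sub ||| 2^i) ≠ 0 := by
      intro h
      exact hp1ne (Nat.xor_eq_zero.mp h).symm
    have hp2pos : 0 < mask ^^^ (sub ||| 2^i) := Nat.pos_of_ne_zero hp2ne0
    have hp2sub : ∀ j, (mask ^^^ (sub ||| 2^i)).testBit j = true → mask.testBit j = true := by
      intro j hj
      rw [Nat.testBit_xor] at hj
      by_cases hmj : mask.testBit j = true
      · exact hmj
      · have hp1j : (sub ||| 2^i).testBit j = true := by
          cases hx : (sub ||| 2^i).testBit j
          · rw [hx] at hj
            simp only [Bool.xor_false] at hj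
            exact absurd hj hmj
          · rfl
        exact absurd (hp1sub j hp1j) hmj
    have hp2le : mask ^^^ (sub ||| 2^i) ≤ mask := Nat.le_of_testBit hp2sub
    have hp2ne : mask ^^^ (sub ||| 2^i) ≠ mask := by
      intro heq
      have h : sub ||| 2^i = 0 := by
        have h2 : mask ^^^ (mask ^^^ (sub ||| 2^i)) = mask ^^^ mask := by rw [heq]
        rwa [← Nat.xor_assoc, Nat.xor_self, Nat.zero_xor] at h2
      omega
    have hp2lt : mask ^^^ (sub ||| 2^i) < mask := lt_of_le_of_ne hp2le hp2ne
    have hdp1 := Hdp _ hp1pos hp1lt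
    have hmed1 := Hmed _ hp1pos hp1lt
    have hdp2 := Hdp _ hp2pos hp2lt
    have hmed2 := Hmed _ hp2pos hp2lt
    rw [pvALoop.eq_def, pvBLoop.eq_def]
    simp only [hdp1, hdp2, hmed1, hmed2, pvOAdd, gt_iff_lt, if_pos hp2pos]
    set c := dpB.getD (sub ||| 2 ^ i) 0 + dpB.getD (mask ^^^ (sub ||| 2 ^ i)) 0 +
      |medB.getD (sub ||| 2 ^ i) 0 - medB.getD (mask ^^^ (sub ||| 2 ^ i)) 0| with hc
    have hbe : (if pvOLt (some c) best = true then some c else best)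
        = (match best with
           | none => some c
           | some b => if c < b then some c else some b) := by
      cases best with
      | none => simp [pvOLt]
      | some b =>
        simp only [pvOLt]
        by_cases hcb : c < b <;> simp [hcb]
    rw [hbe]
    by_cases h0 : sub = 0
    · rw [if_pos h0, if_pos h0]
    · rw [if_neg h0, if_neg h0]
      apply ih
      · have h1 := Nat.and_le_left (n := sub - 1) (m := 2^(i+1)*q)
        omega
      · rw [Nat.and_assoc, Nat.and_self]
      · have h1 := Nat.and_le_left (n := sub - 1) (m := 2^(i+1)*q)
        omega

-- ---- the main fold invariant ----
def pvInv (lists : List (List Int)) (k : Nat)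
    (dpA : Array (Option Int)) (medA : Array Int)
    (dpB medB : Array Int) (mrgB : Array (List Int)) : Prop :=
  dpA.size = 2^lists.length ∧ medA.size = 2^lists.length ∧ dpB.size = 2^lists.length ∧
  medB.size = 2^lists.length ∧ mrgB.size = 2^lists.length ∧
  (∀ m, 1 ≤ m → m ≤ k →
     medA.getD m 0 = medB.getD m 0 ∧ mrgB.getD m [] = pvS lists lists.length m ∧
     dpA.getD m none = some (dpB.getD m 0)) ∧
  (∀ m, m = 0 ∨ k < m → dpA.getD m none = none ∧ dpB.getD m 0 = 0 ∧ mrgB.getD m [] = [])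

theorem pv_step (lists : List (List Int)) (k : Nat)
    (dpA : Array (Option Int)) (medA dpB medB : Array Int) (mrgB : Array (List Int))
    (hI : pvInv lists k dpA medA dpB medB mrgB) (hk : k + 1 < 2 ^ lists.length) :
    pvInv lists (k+1)
      (pvAStep lists lists.length (dpA, medA) (k+1)).1
      (pvAStep lists lists.length (dpA, medA) (k+1)).2
      (pvBStep (lists.map (fun l => PySem.List.sorted l (fun x => x) false)) (dpB, medB, mrgB) (k+1)).1
      (pvBStep (lists.map (fun l => PySem.List.sorted l (fun x => x) false)) (dpB, medB, mrgB) (k+1)).2.1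
      (pvBStep (lists.map (fun l => PySem.List.sorted l (fun x => x) false)) (dpB, medB, mrgB) (k+1)).2.2 := by
  obtain ⟨hszA, hszMA, hszB, hszMB, hszG, hIn, hOut⟩ := hI
  obtain ⟨i, q, hrep, hand⟩ := pvMaskDecomp (k+1) (by omega)
  rw [Nat.add_sub_cancel] at hand
  have h2i : 2^i ≤ k+1 := by rw [hrep]; omega
  have hin : i < lists.length := by
    have h2 : 2^i < 2^lists.length := lt_of_le_of_lt h2i hk
    exact (Nat.pow_lt_pow_iff_right one_lt_two).mp h2
  have hlow : k + 1 - 2^(i+1)*q = 2^i := by rw [hrep, Nat.add_sub_cancel_left]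
  have hxor : (k+1) ^^^ 2^i = 2^(i+1)*q := by
    apply Nat.eq_of_testBit_eq
    intro j
    rw [Nat.testBit_xor, hrep, pv_tb_mask, pv_tb_rest, Nat.testBit_two_pow]
    rcases lt_trichotomy j i with h | h | h
    · simp [h, le_of_lt h, Ne.symm (ne_of_lt h)]
    · subst h; simp
    · simp [show ¬ j < i by omega, show ¬ j = i by omega, show ¬ j ≤ i by omega,
        show ¬ i = j by omega]
  have hor : 2^(i+1)*q ||| 2^i = k+1 := by
    apply Nat.eq_of_testBit_eq
    intro j
    rw [Nat.testBit_or, hrep, pv_tb_mask, pv_tb_rest, Nat.testBit_two_pow]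
    rcases lt_trichotomy j i with h | h | h
    · simp [h, le_of_lt h, Ne.symm (ne_of_lt h)]
    · subst h; simp
    · simp [show ¬ j < i by omega, show ¬ j = i by omega, show ¬ j ≤ i by omega,
        show ¬ i = j by omega]
  have h2ip : 1 ≤ 2^i := Nat.one_le_two_pow
  have hsl : (lists.map (fun l => PySem.List.sorted l (fun x => x) false)).getD i []
      = PySem.List.sorted (lists.getD i []) (fun x => x) false := by
    rw [List.getD_eq_getElem?_getD, List.getElem?_map,
      List.getElem?_eq_getElem (by simpa using hin)]
    simp [List.getD_eq_getElem?_getD, List.getElem?_eq_getElem hin]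
  have hrest : mrgB.getD (2^(i+1)*q) [] = pvS lists lists.length (2^(i+1)*q) := by
    by_cases hq : q = 0
    · subst hq
      rw [mul_zero, (hOut 0 (Or.inl rfl)).2.2]
      unfold pvS
      rw [pv_select_zero]
      rfl
    · have h1 : 1 ≤ 2^(i+1)*q := Nat.mul_pos (Nat.two_pow_pos (i+1)) (Nat.pos_of_ne_zero hq)
      have h2 : 2^(i+1)*q ≤ k := by
        set R := 2^(i+1)*q with hR
        omega
      exact (hIn _ h1 h2).2.1
  have hmg : pvMerge (PySem.List.sorted (lists.getD i []) (fun x => x) false)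
        (mrgB.getD (2^(i+1)*q) [])
      = pvS lists lists.length (k+1) := by
    rw [hrest, pv_merge_S lists i q hin, ← hrep]
  have hSA : PySem.List.sorted (pvASelect lists lists.length (k+1)) (fun x => x) false
      = pvS lists lists.length (k+1) := rfl
  simp only [pvAStep, pvBStep, Nat.add_sub_cancel, hand, hlow, hxor,
    pv_bitLength_two_pow, hsl, hmg, hSA]
  by_cases hq : q = 0
  · subst hq
    rw [mul_zero] at *
    simp only [show (((0:Nat) == 0) = true) = True by simp, show ((0:Nat) = 0) = True by simp,
      if_true]
    refine ⟨by simp [hszA], by simp [hszMA], hszB, by simp [hszMB], by simp [hszG], ?_, ?_⟩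
    · intro m h1 h2
      by_cases hm : m = k + 1
      · subst hm
        refine ⟨?_, ?_, ?_⟩
        · rw [pv_getD_set_self _ _ (show k+1 < medA.size by rw [hszMA]; exact hk),
            pv_getD_set_self _ _ (show k+1 < medB.size by rw [hszMB]; exact hk)]
        · rw [pv_getD_set_self _ _ (show k+1 < mrgB.size by rw [hszG]; exact hk)]
        · rw [pv_getD_set_self _ _ (show k+1 < dpA.size by rw [hszA]; exact hk),
            (hOut (k+1) (by omega)).2.1]
      · have hm' : m ≤ k := by omega
        refine ⟨?_, ?_, ?_⟩
        · rw [pv_getD_set_ne _ (by omega) , pv_getD_set_ne _ (by omega)]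
          exact (hIn m h1 hm').1
        · rw [pv_getD_set_ne _ (by omega)]
          exact (hIn m h1 hm').2.1
        · rw [pv_getD_set_ne _ (by omega)]
          exact (hIn m h1 hm').2.2
    · intro m hm
      have hm' : m = 0 ∨ k < m := by omega
      have hmne : k + 1 ≠ m := by omega
      refine ⟨?_, (hOut m hm').2.1, ?_⟩
      · rw [pv_getD_set_ne _ hmne]
        exact (hOut m hm').1
      · rw [pv_getD_set_ne _ hmne]
        exact (hOut m hm').2.2
  · have hR0 : 2^(i+1)*q ≠ 0 :=
      (Nat.mul_pos (Nat.two_pow_pos (i+1)) (Nat.pos_of_ne_zero hq)).ne'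
    have hbeqn : ¬ ((2^(i+1)*q == 0) = true) := by simp [hR0]
    rw [if_neg hbeqn, if_neg hR0]
    have Hdp : ∀ m, 1 ≤ m → m < k + 1 → dpA.getD m none = some (dpB.getD m 0) := by
      intro m h1 h2
      exact (hIn m h1 (by omega)).2.2
    set V := (PySem.List.pyGet? (pvS lists lists.length (k+1))
      (PySem.Int.floordiv ((pvS lists lists.length (k+1)).length - 1) 2)).getD 0 with hV
    have Hmed : ∀ m, 1 ≤ m → m < k + 1 →
        (medA.setIfInBounds (k+1) V).getD m 0 = (medB.setIfInBounds (k+1) V).getD m 0 := by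
      intro m h1 h2
      rw [pv_getD_set_ne _ (by omega), pv_getD_set_ne _ (by omega)]
      exact (hIn m h1 (by omega)).1
    have hsub0 : ((2^(i+1)*q - 1) &&& 2^(i+1)*q) &&& 2^(i+1)*q = (2^(i+1)*q - 1) &&& 2^(i+1)*q := by
      rw [Nat.and_assoc, Nat.and_self]
    have hne0 : (2^(i+1)*q - 1) &&& 2^(i+1)*q ≠ 2^(i+1)*q := by
      have h1 := Nat.and_le_left (n := 2^(i+1)*q - 1) (m := 2^(i+1)*q)
      set R := 2^(i+1)*q with hR
      omega
    have hfirst : pvALoop dpA (medA.setIfInBounds (k+1) V) (k+1) (2^i) (2^(i+1)*q)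
          (2^(i+1)*q) none
        = pvALoop dpA (medA.setIfInBounds (k+1) V) (k+1) (2^i) (2^(i+1)*q)
          ((2^(i+1)*q - 1) &&& 2^(i+1)*q) none := by
      rw [pvALoop.eq_def]
      simp [hor, hR0]
    have hloopeq := pv_loop_eq dpA (medA.setIfInBounds (k+1) V) dpB (medB.setIfInBounds (k+1) V)
      i q (k+1) hrep Hdp Hmed ((2^(i+1)*q - 1) &&& 2^(i+1)*q) hsub0 hne0 none
    obtain ⟨v, hv⟩ := pvBLoop_some dpB (medB.setIfInBounds (k+1) V) (k+1) (2^i) (2^(i+1)*q)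
      ((2^(i+1)*q - 1) &&& 2^(i+1)*q) none
    rw [hfirst, hloopeq, hv]
    refine ⟨by simp [hszA], by simp [hszMA], by simp [hszB], by simp [hszMB], by simp [hszG], ?_, ?_⟩
    · intro m h1 h2
      by_cases hm : m = k + 1
      · subst hm
        refine ⟨?_, ?_, ?_⟩
        · rw [pv_getD_set_self _ _ (show k+1 < medA.size by rw [hszMA]; exact hk),
            pv_getD_set_self _ _ (show k+1 < medB.size by rw [hszMB]; exact hk)]
        · rw [pv_getD_set_self _ _ (show k+1 < mrgB.size by rw [hszG]; exact hk)]
        · rw [pv_getD_set_self _ _ (show k+1 < dpA.size by rw [hszA]; exact hk),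
            pv_getD_set_self _ _ (show k+1 < dpB.size by rw [hszB]; exact hk)]
          simp [pvOAdd]
      · have hm' : m ≤ k := by omega
        refine ⟨?_, ?_, ?_⟩
        · rw [pv_getD_set_ne _ (by omega), pv_getD_set_ne _ (by omega)]
          exact (hIn m h1 hm').1
        · rw [pv_getD_set_ne _ (by omega)]
          exact (hIn m h1 hm').2.1
        · rw [pv_getD_set_ne _ (by omega), pv_getD_set_ne _ (by omega)]
          exact (hIn m h1 hm').2.2
    · intro m hm
      have hm' : m = 0 ∨ k < m := by omega
      have hmne : k + 1 ≠ m := by omega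
      refine ⟨?_, ?_, ?_⟩
      · rw [pv_getD_set_ne _ hmne]
        exact (hOut m hm').1
      · rw [pv_getD_set_ne _ hmne]
        exact (hOut m hm').2.1
      · rw [pv_getD_set_ne _ hmne]
        exact (hOut m hm').2.2

theorem pv_fold (lists : List (List Int)) : ∀ k, k < 2 ^ lists.length →
    pvInv lists k
      ((List.range' 1 k).foldl (pvAStep lists lists.length)
        (Array.replicate (2^lists.length) none, Array.replicate (2^lists.length) 0)).1
      ((List.range' 1 k).foldl (pvAStep lists lists.length)
        (Array.replicate (2^lists.length) none, Array.replicate (2^lists.length) 0)).2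
      ((List.range' 1 k).foldl (pvBStep (lists.map (fun l => PySem.List.sorted l (fun x => x) false)))
        (Array.replicate (2^lists.length) 0, Array.replicate (2^lists.length) 0, Array.replicate (2^lists.length) [])).1
      ((List.range' 1 k).foldl (pvBStep (lists.map (fun l => PySem.List.sorted l (fun x => x) false)))
        (Array.replicate (2^lists.length) 0, Array.replicate (2^lists.length) 0, Array.replicate (2^lists.length) [])).2.1
      ((List.range' 1 k).foldl (pvBStep (lists.map (fun l => PySem.List.sorted l (fun x => x) false)))
        (Array.replicate (2^lists.length) 0, Array.replicate (2^lists.length) 0, Array.replicate (2^lists.length) [])).2.2 := by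
  intro k
  induction k with
  | zero =>
    intro _
    simp only [List.range'_zero, List.foldl_nil]
    refine ⟨by simp, by simp, by simp, by simp, by simp, ?_, ?_⟩
    · intro m h1 h2
      omega
    · intro m _
      exact ⟨pv_getD_replicate _ _ _ _ rfl, pv_getD_replicate _ _ _ _ rfl,
        pv_getD_replicate _ _ _ _ rfl⟩
  | succ k ih =>
    intro hk
    have h1k : 1 + 1 * k = k + 1 := by omega
    rw [List.range'_concat, List.foldl_append, List.foldl_append, List.foldl_cons,
      List.foldl_nil, List.foldl_cons, List.foldl_nil, h1k]
    exact pv_step lists k _ _ _ _ _ (ih (by omega)) hk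

-- ===== VERDICT (by name: the statement is the Claim_ definition above) =====
theorem minMergeCost_spec : Claim_equal_minMergeCost := by
  unfold Claim_equal_minMergeCost
  intro lists _ hpre
  unfold Spec_minMergeCost
  have hn : 1 ≤ lists.length := List.length_pos_iff.mpr hpre.1
  have hlim : 2 ≤ 2^lists.length := by
    calc (2:Nat) = 2^1 := by norm_num
    _ ≤ 2^lists.length := Nat.pow_le_pow_right (by norm_num) hn
  have hfold := pv_fold lists (2^lists.length - 1) (by omega)
  obtain ⟨_, _, _, _, _, hIn, _⟩ := hfold
  have h := (hIn (2^lists.length - 1) (by omega) le_rfl).2.2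
  simp only [minMergeCost, minMergeCost_alt]
  rw [h]
  rfl
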